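-- pv_equiv track=rewrite | github.com/blitzyoo55-ux/hollowforge | hollowforge/backend/app/services/ai_quality_service.py | _compute_bad_tag_penalty
-- ===== SOURCE A (Python) =====
-- QUALITY_BAD_TAGS_PIXEL_ART_EXEMPT: set[str] = {
--     "pixelated",
--     "jpeg_artifacts",
--     "blurry",
--     "low_quality",
--     "normal_quality",
-- }
--
-- def _compute_bad_tag_penalty(bad_tags: list[str], pixel_art_mode: bool = False) -> int:
--     """Compute cumulative penalty from WD14 quality-negative tags.
--
--     When pixel_art_mode=True, tags in QUALITY_BAD_TAGS_PIXEL_ART_EXEMPT are skipped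
--     because they describe intentional pixel-art style characteristics, not defects.
--     """
--     penalty = 0
--     for tag in bad_tags:
--         if pixel_art_mode and tag in QUALITY_BAD_TAGS_PIXEL_ART_EXEMPT:
--             continue
--         if tag == "worst_quality":
--             penalty += 30
--         elif tag == "low_quality":
--             penalty += 15
--         else:
--             penalty += 10
--     return penalty
-- ===== SOURCE B (Python) =====
-- from collections import Counter
--
-- QUALITY_BAD_TAGS_PIXEL_ART_EXEMPT: set[str] = {
--     "pixelated",
--     "jpeg_artifacts",
--     "blurry",
--     "low_quality",
--     "normal_quality",
-- }
--
-- def _compute_bad_tag_penalty(bad_tags: list[str], pixel_art_mode: bool = False) -> int: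
--     """Frequency-table formulation: filter exempt tags (pixel mode), tally with
--     Counter, and read the penalty off a closed-form expression."""
--     if pixel_art_mode:
--         considered = [t for t in bad_tags if t not in QUALITY_BAD_TAGS_PIXEL_ART_EXEMPT]
--     else:
--         considered = list(bad_tags)
--     counts = Counter(considered)
--     worst = counts["worst_quality"]
--     low = counts["low_quality"]
--     return 30 * worst + 15 * low + 10 * (len(considered) - worst - low)
-- ===== Notes on version B (the rewrite author's own statement) =====
-- stated objective: alternative
-- what changed: Replaced the branch-and-accumulate loop with a filter + frequency count (Counter) and a closed-form expression 30*worst + 15*low + 10*(rest).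
import Mathlib
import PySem

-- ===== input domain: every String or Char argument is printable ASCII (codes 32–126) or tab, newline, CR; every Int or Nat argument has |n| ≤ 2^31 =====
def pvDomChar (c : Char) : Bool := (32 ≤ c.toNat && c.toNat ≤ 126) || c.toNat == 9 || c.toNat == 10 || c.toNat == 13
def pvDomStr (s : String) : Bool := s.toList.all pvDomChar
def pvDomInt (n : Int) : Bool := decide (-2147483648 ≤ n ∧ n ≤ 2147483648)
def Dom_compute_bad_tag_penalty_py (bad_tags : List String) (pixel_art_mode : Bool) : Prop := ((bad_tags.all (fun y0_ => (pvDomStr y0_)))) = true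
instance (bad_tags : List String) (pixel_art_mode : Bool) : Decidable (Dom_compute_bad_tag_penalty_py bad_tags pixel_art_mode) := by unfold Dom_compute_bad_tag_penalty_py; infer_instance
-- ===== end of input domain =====

-- B replaces A's branch-and-accumulate loop by a filter + frequency count and a
-- closed-form expression (objective: alternative decomposition, same cost).

-- ===== PORT A =====
-- the module-level set QUALITY_BAD_TAGS_PIXEL_ART_EXEMPT
def pvExempt : PySem.Set String :=
  PySem.Set.ofList ["pixelated", "jpeg_artifacts", "blurry", "low_quality", "normal_quality"]

def compute_bad_tag_penalty_py (bad_tags : List String) (pixel_art_mode : Bool) : Int :=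
  -- penalty = 0; for tag in bad_tags: …
  bad_tags.foldl (fun penalty tag =>
    if pixel_art_mode && PySem.Set.contains pvExempt tag then penalty      -- continue
    else if tag == "worst_quality" then penalty + 30
    else if tag == "low_quality" then penalty + 15
    else penalty + 10) 0

-- ===== PORT B =====
def compute_bad_tag_penalty_py_alt (bad_tags : List String) (pixel_art_mode : Bool) : Int :=
  let considered :=
    if pixel_art_mode then bad_tags.filter (fun t => !(PySem.Set.contains pvExempt t))
    else bad_tags
  -- Counter lookups ported as list counts of the filtered list
  let worst : Int := PySem.List.count considered "worst_quality"
  let low : Int := PySem.List.count considered "low_quality"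
  30 * worst + 15 * low + 10 * ((considered.length : Int) - worst - low)

-- ===== PRECONDITION & SPEC =====
def Spec_compute_bad_tag_penalty_py (bad_tags : List String) (pixel_art_mode : Bool) (out : Int) : Prop := out = compute_bad_tag_penalty_py_alt bad_tags pixel_art_mode
instance (bad_tags : List String) (pixel_art_mode : Bool) (out : Int) : Decidable (Spec_compute_bad_tag_penalty_py bad_tags pixel_art_mode out) := by unfold Spec_compute_bad_tag_penalty_py; infer_instance

-- ===== CLAIM (what is proved, stated in full; the proofs are below) =====
def Claim_equal_compute_bad_tag_penalty_py : Prop := ∀ (bad_tags : List String) (pixel_art_mode : Bool), Dom_compute_bad_tag_penalty_py bad_tags pixel_art_mode → Spec_compute_bad_tag_penalty_py bad_tags pixel_art_mode (compute_bad_tag_penalty_py bad_tags pixel_art_mode)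

-- ===== LEMMAS AND PROOFS =====

-- A's loop, started from acc, equals acc plus B's closed form: induction on the list.
theorem pv_main (bad_tags : List String) (pixel_art_mode : Bool) (acc : Int) :
    bad_tags.foldl (fun penalty tag =>
      if pixel_art_mode && PySem.Set.contains pvExempt tag then penalty
      else if tag == "worst_quality" then penalty + 30
      else if tag == "low_quality" then penalty + 15
      else penalty + 10) acc
      = acc + compute_bad_tag_penalty_py_alt bad_tags pixel_art_mode := by
  induction bad_tags generalizing acc with
  | nil => simp [compute_bad_tag_penalty_py_alt]
  | cons t ts ih =>
    simp only [List.foldl_cons, ih]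
    simp only [compute_bad_tag_penalty_py_alt, PySem.List.count]
    cases pixel_art_mode with
    | false =>
      simp only [Bool.false_and, List.filter]
      by_cases hw : t = "worst_quality" <;> by_cases hl : t = "low_quality" <;>
        simp [hw, hl] <;> ring
    | true =>
      by_cases he : PySem.Set.contains pvExempt t
      · have hm : t ∈ pvExempt := by simpa using he
        simp [hm]
      · have hm : ¬ t ∈ pvExempt := by simpa using he
        rcases eq_or_ne t "worst_quality" with hw | hw
        · subst hw; simp [hm]; ring
        · rcases eq_or_ne t "low_quality" with hl | hl
          · -- impossible: "low_quality" is in the exempt set, contradicting hm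
            subst hl; exact absurd (by decide) hm
          · simp [hm, hw, hl]; ring

-- ===== VERDICT (by name: the statement is the Claim_ definition above) =====
theorem compute_bad_tag_penalty_py_spec : Claim_equal_compute_bad_tag_penalty_py := by
  intro bad_tags pixel_art_mode _
  unfold Spec_compute_bad_tag_penalty_py compute_bad_tag_penalty_py
  simpa using pv_main bad_tags pixel_art_mode 0
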